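-- pv_equiv track=rewrite | github.com/sofc-T/A2SV- | Onboarding/element-appearing-more-than-25-in-sorted-array.py | findSpecialInteger
-- ===== SOURCE A (Python) =====
-- from typing import List
--
-- def findSpecialInteger(arr: List[int]) -> int:
--     i = 0
--     quarter = len(arr) // 4 + 1
--     while i < len(arr):
--         c = 0
--         temp = arr[i]
--         while i < len(arr) and arr[i] == temp:
--             c += 1
--             i += 1
--         if c >=quarter:
--             return temp
-- ===== SOURCE B (Python) =====
-- def findSpecialInteger(arr):
--     # Probe only the candidate positions q-1, 2q-1, 3q-1, ... (any block of
--     # >= q equal consecutive elements must contain one of them), expand the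
--     # run of equal elements around each probe, and return the first probe
--     # whose run has length >= q.  Probes are visited left to right, so the
--     # first qualifying probe belongs to the leftmost qualifying run.
--     n = len(arr)
--     q = n // 4 + 1
--     p = q - 1
--     while p < n:
--         v = arr[p]
--         l = p
--         while l > 0 and arr[l - 1] == v:
--             l -= 1
--         r = p
--         while r + 1 < n and arr[r + 1] == v:
--             r += 1
--         if r - l + 1 >= q:
--             return v
--         p += q
-- ===== Notes on version B (the rewrite author's own statement) =====
-- stated objective: alternative
-- what changed: B replaces A's full left-to-right scan over all runs by probing only the candidate positions q-1, 2q-1, 3q-1, ... (every block of >= q equal consecutive elements must contain one), expanding the run around each probe and returning at the first qualifying probe, which is the leftmost qualifying run.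
import Mathlib
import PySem

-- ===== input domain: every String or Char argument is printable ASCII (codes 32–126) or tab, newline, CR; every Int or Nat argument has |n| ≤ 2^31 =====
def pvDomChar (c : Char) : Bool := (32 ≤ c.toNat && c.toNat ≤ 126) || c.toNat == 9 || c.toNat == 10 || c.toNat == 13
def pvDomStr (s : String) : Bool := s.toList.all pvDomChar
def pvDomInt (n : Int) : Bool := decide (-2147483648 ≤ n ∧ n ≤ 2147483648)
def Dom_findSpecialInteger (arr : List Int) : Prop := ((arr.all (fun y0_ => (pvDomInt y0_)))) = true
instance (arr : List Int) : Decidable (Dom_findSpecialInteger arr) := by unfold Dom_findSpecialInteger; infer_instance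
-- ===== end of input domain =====

-- B replaces A's left-to-right scan over all runs by probing only the candidate
-- positions q-1, 2q-1, 3q-1, ... (every block of >= q equal consecutive elements
-- must contain one) and expanding the run around each probe (alternative algorithm).

-- ===== PORT A =====
-- the outer while loop: at each step count the current run (inner while = takeWhile),
-- return temp if it qualifies, otherwise continue after the run (dropWhile)
def goA (q : Int) : List Int → Int
  | [] => 0  -- Python A falls off the loop and returns None here; excluded by Pre_
  | x :: xs =>
    if q ≤ 1 + ((xs.takeWhile (fun y => y == x)).length : Int) then x
    else goA q (xs.dropWhile (fun y => y == x))
termination_by l => l.length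
decreasing_by
  simpa using Nat.lt_succ_of_le (List.length_dropWhile_le _ _)

def findSpecialInteger (arr : List Int) : Int :=
  goA (PySem.Int.floordiv (arr.length : Int) 4 + 1) arr

-- ===== PORT B =====
-- B's inner 'while l > 0 and arr[l-1] == v: l -= 1' (index l-1 is always in range
-- at call sites, so getD's default is never read)
def expandL (arr : List Int) (v : Int) : Nat → Nat
  | 0 => 0
  | l + 1 => if arr.getD l 0 == v then expandL arr v l else l + 1

-- B's inner 'while r + 1 < n and arr[r+1] == v: r += 1'
def expandR (arr : List Int) (v : Int) (r : Nat) : Nat :=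
  if _h : r + 1 < arr.length then
    if arr.getD (r + 1) 0 == v then expandR arr v (r + 1) else r
  else r
termination_by arr.length - r

-- B's outer probe loop 'while p < n: ... p += q'; 'r - l + 1 >= q' is written
-- 'q ≤ r + 1 - l' (equal in Nat since l ≤ r at every use); the 'else 0' behind
-- the '1 ≤ q' test is a totality guard only: q = n//4+1 ≥ 1 at the call site
def goB (arr : List Int) (q p : Nat) : Int :=
  if _h : p < arr.length then
    let v := arr.getD p 0
    let l := expandL arr v p
    let r := expandR arr v p
    if q ≤ r + 1 - l then v
    else if _hq : 1 ≤ q then goB arr q (p + q) else 0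
  else 0  -- Python B falls off the loop and returns None here; excluded by Pre_
termination_by arr.length - p

def findSpecialInteger_alt (arr : List Int) : Int :=
  goB arr (arr.length / 4 + 1) (arr.length / 4 + 1 - 1)

-- ===== PRECONDITION & SPEC =====
-- Pre_ excludes exactly the inputs on which A (and B) fall off the loop and return
-- None, which is not an Int: those where no contiguous block of equal elements has
-- length ≥ len(arr)//4 + 1.
def Pre_findSpecialInteger (arr : List Int) : Prop :=
  ∃ i j : Fin arr.length, i ≤ j ∧ (∀ k : Fin arr.length, i ≤ k → k ≤ j → arr.get k = arr.get i) ∧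
    arr.length / 4 + 1 ≤ (j : Nat) - (i : Nat) + 1
instance (arr : List Int) : Decidable (Pre_findSpecialInteger arr) := by
  unfold Pre_findSpecialInteger; infer_instance
def pvWitness_findSpecialInteger : List Int := [1]

def Spec_findSpecialInteger (arr : List Int) (out : Int) : Prop := out = findSpecialInteger_alt arr
instance (arr : List Int) (out : Int) : Decidable (Spec_findSpecialInteger arr out) := by unfold Spec_findSpecialInteger; infer_instance

-- ===== CLAIM (what is proved, stated in full; the proofs are below) =====
def Claim_equal_findSpecialInteger : Prop := ∀ (arr : List Int), Dom_findSpecialInteger arr → Pre_findSpecialInteger arr → Spec_findSpecialInteger arr (findSpecialInteger arr)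

-- ===== LEMMAS AND PROOFS =====

-- the run-length decomposition of a list (proof-only; mirrors A's outer loop)
def decomp : List Int → List (Int × Nat)
  | [] => []
  | x :: xs => (x, 1 + (xs.takeWhile (fun y => y == x)).length) :: decomp (xs.dropWhile (fun y => y == x))
termination_by l => l.length
decreasing_by
  simpa using Nat.lt_succ_of_le (List.length_dropWhile_le _ _)

def flatR : List (Int × Nat) → List Int
  | [] => []
  | (v, c) :: t => List.replicate c v ++ flatR t

-- search the decomposition for the first run of length ≥ q
def findQN (q : Nat) : List (Int × Nat) → Int
  | [] => 0
  | (v, c) :: t => if q ≤ c then v else findQN q t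

theorem goA_eq_findQN (q : Nat) (l : List Int) : goA (q : Int) l = findQN q (decomp l) := by
  induction l using goA.induct (q := (q : Int)) with
  | case1 => simp [goA, decomp, findQN]
  | case2 x xs hc =>
    have hc' : q ≤ 1 + (xs.takeWhile (fun y => y == x)).length := by exact_mod_cast hc
    rw [goA, decomp, findQN, if_pos hc, if_pos hc']
  | case3 x xs hc ih =>
    have hc' : ¬ q ≤ 1 + (xs.takeWhile (fun y => y == x)).length := by
      intro h; exact hc (by exact_mod_cast h)
    rw [goA, decomp, findQN, if_neg hc, if_neg hc', ih]

theorem takeWhile_eq_replicate (x : Int) (xs : List Int) :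
    xs.takeWhile (fun y => y == x) = List.replicate (xs.takeWhile (fun y => y == x)).length x := by
  rw [List.eq_replicate_iff]
  refine ⟨rfl, fun b hb => ?_⟩
  exact eq_of_beq (List.mem_takeWhile_imp (p := fun y => y == x) hb)

theorem flatR_decomp (l : List Int) : flatR (decomp l) = l := by
  induction l using decomp.induct with
  | case1 => simp [decomp, flatR]
  | case2 x xs ih =>
    rw [decomp, flatR, ih, Nat.add_comm, List.replicate_succ]
    rw [← takeWhile_eq_replicate]
    simp [List.takeWhile_append_dropWhile]

theorem decomp_pos (l : List Int) : ∀ vc ∈ decomp l, 1 ≤ vc.2 := by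
  induction l using decomp.induct with
  | case1 => simp [decomp]
  | case2 x xs ih =>
    rw [decomp]
    intro vc hvc
    rcases List.mem_cons.mp hvc with h | h
    · subst h; simp
    · exact ih vc h

theorem decomp_chain (l : List Int) : List.IsChain (fun a b => a.1 ≠ b.1) (decomp l) := by
  induction l using decomp.induct with
  | case1 => simp [decomp]
  | case2 x xs ih =>
    rw [decomp, List.isChain_cons]
    refine ⟨?_, ih⟩
    intro y hy
    rcases hd : xs.dropWhile (fun y => y == x) with _ | ⟨z, zs⟩
    · rw [hd] at hy; simp [decomp] at hy
    · rw [hd, decomp] at hy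
      simp only [List.head?_cons, Option.mem_def, Option.some.injEq] at hy
      have hz := List.head?_dropWhile_not (fun y => y == x) xs
      rw [hd] at hz
      simp only [List.head?_cons] at hz
      subst hy
      simp only [ne_eq]
      intro hxz
      exact absurd (beq_iff_eq.mpr hxz.symm) (by simp [hz])

theorem expandL_eq (arr : List Int) (v : Int) (p l : Nat) (hlp : l ≤ p)
    (hall : ∀ i, l ≤ i → i ≤ p → arr.getD i 0 = v)
    (hleft : l = 0 ∨ arr.getD (l - 1) 0 ≠ v) :
    expandL arr v p = l := by
  induction p with
  | zero => simp [expandL]; omega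
  | succ p ih =>
    rw [expandL]
    by_cases hl : l = p + 1
    · subst hl
      have : arr.getD p 0 ≠ v := by
        rcases hleft with h | h
        · omega
        · simpa using h
      rw [if_neg (by simpa using this)]
    · have hlp' : l ≤ p := by omega
      have hv : arr.getD p 0 = v := hall p hlp' (by omega)
      rw [if_pos (by simpa using hv)]
      exact ih hlp' (fun i h1 h2 => hall i h1 (by omega))

theorem expandR_eq (arr : List Int) (v : Int) (p r : Nat) (hpr : p ≤ r) (hrn : r < arr.length)
    (hall : ∀ i, p ≤ i → i ≤ r → arr.getD i 0 = v)
    (hright : r = arr.length - 1 ∨ arr.getD (r + 1) 0 ≠ v) :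
    expandR arr v p = r := by
  induction hd : r - p generalizing p with
  | zero =>
    have hp : p = r := by omega
    subst hp
    rw [expandR]
    by_cases h : p + 1 < arr.length
    · have hne : arr.getD (p + 1) 0 ≠ v := by
        rcases hright with h' | h'
        · omega
        · exact h'
      rw [dif_pos h, if_neg (by simpa using hne)]
    · rw [dif_neg h]
  | succ c ih =>
    have h1 : p + 1 ≤ r := by omega
    have h2 : p + 1 < arr.length := by omega
    have hv : arr.getD (p + 1) 0 = v := hall (p + 1) (by omega) h1
    rw [expandR, dif_pos h2, if_pos (by simpa using hv)]
    exact ih (p + 1) h1 (fun i hi1 hi2 => hall i (by omega) hi2) (by omega)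

theorem goB_eq (arr : List Int) (q p : Nat) (h : p < arr.length) :
    goB arr q p =
      (if q ≤ expandR arr (arr.getD p 0) p + 1 - expandL arr (arr.getD p 0) p
        then arr.getD p 0
        else if 1 ≤ q then goB arr q (p + q) else 0) := by
  rw [goB, dif_pos h]
  rfl

theorem getD_mid (A0 t : List Int) (c : Nat) (v : Int) (i : Nat)
    (h1 : A0.length ≤ i) (h2 : i < A0.length + c) :
    (A0 ++ (List.replicate c v ++ t)).getD i 0 = v := by
  rw [List.getD_append_right _ _ _ _ h1,
      List.getD_append _ _ _ _ (by rw [List.length_replicate]; omega),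
      List.getD_eq_getElem?_getD, List.getElem?_replicate, if_pos (by omega)]
  rfl

theorem getD_before (A0 t : List Int) (v : Int) (hA : A0 ≠ [])
    (hbd : A0.getLast? ≠ some v) :
    (A0 ++ t).getD (A0.length - 1) 0 ≠ v := by
  have hlen : 0 < A0.length := List.length_pos_of_ne_nil hA
  rw [List.getD_append _ _ _ _ (by omega), List.getD_eq_getElem?_getD,
      List.getElem?_eq_getElem (by omega), Option.getD_some]
  intro hv
  apply hbd
  rw [List.getLast?_eq_getElem?, List.getElem?_eq_getElem (by omega), hv]

theorem getLast?_append_replicate (A0 : List Int) (c : Nat) (v : Int) (hc : 1 ≤ c) :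
    (A0 ++ List.replicate c v).getLast? = some v := by
  rw [List.getLast?_append_of_ne_nil _ (by simp; omega), List.getLast?_replicate,
      if_neg (by omega)]

-- main invariant: probing from p returns the first qualifying run among those not
-- yet passed, provided every run already strictly below p started after p - q
theorem goB_invariant (q : Nat) (hq : 1 ≤ q) :
    ∀ m rs (A0 : List Int) (p : Nat),
    (A0 ++ flatR rs).length + q - p ≤ m →
    (∀ vc ∈ rs, 1 ≤ vc.2) →
    List.IsChain (fun a b => a.1 ≠ b.1) rs →
    (∀ vc ∈ rs.head?, A0.getLast? ≠ some vc.1) →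
    A0.length ≤ p →
    (p < q + A0.length ∨ ∃ vc ∈ rs.head?, p < A0.length + vc.2) →
    goB (A0 ++ flatR rs) q p = findQN q rs := by
  intro m
  induction m with
  | zero =>
    intro rs A0 p hm hpos hchain hbd hlen halign
    exfalso
    rcases rs with _ | ⟨⟨v0, c0⟩, rest⟩
    · rcases halign with h | ⟨vc, hh, h⟩
      · rw [show flatR [] = [] from rfl, List.append_nil] at hm
        omega
      · simp at hh
    · have hL : (A0 ++ flatR ((v0, c0) :: rest)).length
          = A0.length + c0 + (flatR rest).length := by
        rw [show flatR ((v0, c0) :: rest) = List.replicate c0 v0 ++ flatR rest from rfl,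
            List.length_append, List.length_append, List.length_replicate]
        omega
      rcases halign with h | ⟨vc, hh, h⟩
      · omega
      · simp only [List.head?_cons, Option.mem_def, Option.some.injEq] at hh
        obtain rfl := hh
        simp only [] at h
        omega
  | succ m ih =>
    intro rs
    induction rs with
    | nil =>
      intro A0 p hm hpos hchain hbd hlen halign
      rw [show flatR [] = [] from rfl, List.append_nil] at *
      rw [goB, dif_neg (by omega), findQN]
    | cons vc rest ih_rs =>
      obtain ⟨v0, c0⟩ := vc
      intro A0 p hm hpos hchain hbd hlen halign
      have hc0 : 1 ≤ c0 := hpos _ (List.mem_cons_self ..)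
      have hflat : flatR ((v0, c0) :: rest) = List.replicate c0 v0 ++ flatR rest := rfl
      have hchain' := List.isChain_cons.mp hchain
      by_cases hp0 : p < A0.length + c0
      · -- the probe p lies inside the first remaining run
        have hpn : p < (A0 ++ flatR ((v0, c0) :: rest)).length := by
          rw [List.length_append, hflat, List.length_append, List.length_replicate]
          omega
        have hv : (A0 ++ flatR ((v0, c0) :: rest)).getD p 0 = v0 := by
          rw [hflat]; exact getD_mid _ _ _ _ _ hlen hp0
        have hl : expandL (A0 ++ flatR ((v0, c0) :: rest)) v0 p = A0.length := by
          apply expandL_eq _ _ _ _ hlen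
          · intro i h1 h2
            rw [hflat]; exact getD_mid _ _ _ _ _ h1 (by omega)
          · rcases A0.eq_nil_or_concat' with hA | ⟨ys, y, hA⟩
            · left; rw [hA]; rfl
            · right
              rw [hflat]
              apply getD_before _ _ _ (by rw [hA]; simp)
              exact hbd _ rfl
        have hr : expandR (A0 ++ flatR ((v0, c0) :: rest)) v0 p = A0.length + c0 - 1 := by
          apply expandR_eq _ _ _ _ (by omega)
          · rw [List.length_append, hflat, List.length_append, List.length_replicate]
            omega
          · intro i h1 h2
            rw [hflat]; exact getD_mid _ _ _ _ _ (by omega) (by omega)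
          · rcases rest with _ | ⟨⟨v1, c1⟩, rest'⟩
            · left
              rw [List.length_append, hflat,
                  show flatR ([] : List (Int × Nat)) = [] from rfl, List.append_nil,
                  List.length_replicate]
            · right
              have hc1 : 1 ≤ c1 := hpos _ (List.mem_cons_of_mem _ (List.mem_cons_self ..))
              have hne : v0 ≠ v1 := hchain'.1 (v1, c1) rfl
              have hidx : A0.length + c0 - 1 + 1 = A0.length + c0 := by omega
              have hv1 : (A0 ++ flatR ((v0, c0) :: (v1, c1) :: rest')).getD (A0.length + c0) 0 = v1 := by
                rw [hflat, show flatR ((v1, c1) :: rest') = List.replicate c1 v1 ++ flatR rest' from rfl,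
                    ← List.append_assoc]
                have hL : (A0 ++ List.replicate c0 v0).length = A0.length + c0 := by
                  rw [List.length_append, List.length_replicate]
                rw [List.getD_append_right _ _ _ _ (by omega), hL, Nat.sub_self,
                    List.getD_append _ _ _ _ (by rw [List.length_replicate]; omega),
                    List.getD_eq_getElem?_getD, List.getElem?_replicate, if_pos (by omega)]
                rfl
              rw [hidx, hv1]
              exact fun hc => hne hc.symm
        rw [goB_eq _ _ _ hpn, hv, hl, hr]
        have hrl : A0.length + c0 - 1 + 1 - A0.length = c0 := by omega
        rw [hrl]
        by_cases hqc : q ≤ c0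
        · rw [if_pos hqc, findQN, if_pos hqc]
        · rw [if_neg hqc, if_pos hq, findQN, if_neg hqc]
          have harr : A0 ++ flatR ((v0, c0) :: rest) = (A0 ++ List.replicate c0 v0) ++ flatR rest := by
            rw [hflat, List.append_assoc]
          rw [harr]
          apply ih
          · rw [← harr]; omega
          · exact fun vc h => hpos vc (List.mem_cons_of_mem _ h)
          · exact hchain'.2
          · intro vc h
            rw [getLast?_append_replicate _ _ _ hc0]
            intro hcontra
            injection hcontra with h'
            exact hchain'.1 vc h h'
          · rw [List.length_append, List.length_replicate]; omega
          · left
            rw [List.length_append, List.length_replicate]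
            omega
      · -- the first remaining run lies entirely below p: it cannot qualify
        have hp1 : A0.length + c0 ≤ p := by omega
        have hc0q : c0 < q := by
          rcases halign with h | ⟨vc', hh, h⟩
          · omega
          · simp only [List.head?_cons, Option.mem_def, Option.some.injEq] at hh
            obtain rfl := hh
            simp only [] at h
            omega
        rw [findQN, if_neg (by omega)]
        have harr : A0 ++ flatR ((v0, c0) :: rest) = (A0 ++ List.replicate c0 v0) ++ flatR rest := by
          rw [hflat, List.append_assoc]
        rw [harr]
        apply ih_rs
        · rw [← harr]; exact hm
        · exact fun vc h => hpos vc (List.mem_cons_of_mem _ h)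
        · exact hchain'.2
        · intro vc h
          rw [getLast?_append_replicate _ _ _ hc0]
          intro hcontra
          injection hcontra with h'
          exact hchain'.1 vc h h'
        · rw [List.length_append, List.length_replicate]; omega
        · left
          rw [List.length_append, List.length_replicate]
          rcases halign with h | ⟨vc', hh, h⟩
          · omega
          · simp only [List.head?_cons, Option.mem_def, Option.some.injEq] at hh
            obtain rfl := hh
            simp only [] at h
            omega

-- ===== VERDICT (by name: the statement is the Claim_ definition above) =====
theorem findSpecialInteger_spec : Claim_equal_findSpecialInteger := by
  intro arr _ _
  unfold Spec_findSpecialInteger findSpecialInteger findSpecialInteger_alt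
  have hq : PySem.Int.floordiv (arr.length : Int) 4 + 1 = ((arr.length / 4 + 1 : Nat) : Int) := by
    simp
  rw [hq, goA_eq_findQN]
  have hinv := goB_invariant (arr.length / 4 + 1) (by omega)
      ((flatR (decomp arr)).length + (arr.length / 4 + 1)) (decomp arr) [] (arr.length / 4)
      (by simp) (decomp_pos arr) (decomp_chain arr) (by intro vc h; simp) (by simp)
      (Or.inl (by simp))
  rw [List.nil_append, flatR_decomp] at hinv
  rw [show arr.length / 4 + 1 - 1 = arr.length / 4 from by omega]
  exact hinv.symm
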